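-- pv_equiv track=rewrite | github.com/prestonhemmy/highest-value-lcs | src/hvlcs.py | hvlcs
-- ===== SOURCE A (Python) =====
-- def hvlcs(a, b, values):
--     m = len(a)
--     n = len(b)
--
--     # initialize 0th row and 0th col to all 0s
--     table = [[0 for _ in range(n + 1)] for _ in range(m + 1)]
--
--     for i in range(1, m + 1):
--         for j in range(1, n + 1):
--             if a[i - 1] == b[j - 1]:
--                 # add value if matching
--                 table[i][j] = max(values[a[i - 1]] + table[i - 1][j - 1], table[i - 1][j], table[i][j - 1])
--             else:
--                 # o.w. recurse
--                 table[i][j] = max(table[i - 1][j], table[i][j - 1])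
--
--     return table, table[m][n]
-- ===== SOURCE B (Python) =====
-- def hvlcs(a, b, values):
--     # Top-down memoized recursion instead of A's bottom-up nested-loop fill;
--     # driven cell-by-cell so recursion depth stays O(1) once predecessors are memoized.
--     memo = {}
--
--     def solve(i, j):
--         if i == 0 or j == 0:
--             return 0
--         key = (i, j)
--         if key in memo:
--             return memo[key]
--         if a[i - 1] == b[j - 1]:
--             r = max(values[a[i - 1]] + solve(i - 1, j - 1), solve(i - 1, j), solve(i, j - 1))
--         else:
--             r = max(solve(i - 1, j), solve(i, j - 1))
--         memo[key] = r
--         return r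
--
--     table = [[solve(i, j) for j in range(len(b) + 1)] for i in range(len(a) + 1)]
--     return table, table[len(a)][len(b)]
-- ===== Notes on version B (the rewrite author's own statement) =====
-- stated objective: alternative
-- what changed: Replaces A's bottom-up nested-loop fill of a preallocated table with top-down memoized recursion: a recursive solve(i,j) with a dict memo computes each cell from its three predecessors on demand, and the table is produced by querying solve for every cell.
import Mathlib
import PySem

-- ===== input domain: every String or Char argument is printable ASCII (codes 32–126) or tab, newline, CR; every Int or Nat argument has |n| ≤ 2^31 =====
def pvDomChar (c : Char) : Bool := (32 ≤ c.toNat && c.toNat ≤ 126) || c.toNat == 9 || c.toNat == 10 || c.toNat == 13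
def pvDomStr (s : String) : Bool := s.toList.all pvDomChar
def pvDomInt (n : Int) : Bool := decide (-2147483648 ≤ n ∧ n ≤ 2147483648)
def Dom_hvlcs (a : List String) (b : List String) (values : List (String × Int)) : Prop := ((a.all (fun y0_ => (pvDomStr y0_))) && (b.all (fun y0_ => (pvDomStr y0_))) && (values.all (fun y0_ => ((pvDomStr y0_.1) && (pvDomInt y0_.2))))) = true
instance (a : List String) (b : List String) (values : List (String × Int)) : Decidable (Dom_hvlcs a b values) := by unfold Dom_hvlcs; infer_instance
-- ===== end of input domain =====

-- B replaces A's bottom-up nested-loop table fill with top-down memoized recursion (solve(i,j) + a memo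
-- dict, queried for every cell); same values, objective: alternative decomposition, same asymptotic cost.

-- ===== PORT A =====
-- literal transliteration of Source A: nested loops over range(1, m+1) × range(1, n+1),
-- mutating a preallocated (m+1)×(n+1) zero table in place.
def hvlcs (a : List String) (b : List String) (values : List (String × Int)) : List (List Int) × Int :=
  let m := a.length
  let n := b.length
  -- table = [[0 for _ in range(n + 1)] for _ in range(m + 1)]
  let table0 : List (List Int) :=
    (List.range (m + 1)).map (fun _ => (List.range (n + 1)).map (fun _ => (0 : Int)))
  let table :=
    (PySem.List.pyRange 1 ((m : Int) + 1) 1).foldl (fun t iI =>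
      (PySem.List.pyRange 1 ((n : Int) + 1) 1).foldl (fun t jI =>
        -- i ∈ [1,m], j ∈ [1,n], so .toNat and the list indexings below are exact
        let i := iI.toNat
        let j := jI.toNat
        let ai := a.getD (i - 1) ""          -- a[i - 1], always in range
        let bj := b.getD (j - 1) ""          -- b[j - 1], always in range
        let c : Int :=
          if ai = bj then
            -- values[a[i-1]]: Python raises KeyError when the key is missing; Pre_hvlcs excludes that
            max ((values.lookup ai).getD 0 + ((t.getD (i - 1) []).getD (j - 1) 0))
              (max ((t.getD (i - 1) []).getD j 0) ((t.getD i []).getD (j - 1) 0))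
          else
            max ((t.getD (i - 1) []).getD j 0) ((t.getD i []).getD (j - 1) 0)
        t.set i ((t.getD i []).set j c)) t) table0
  (table, (table.getD m []).getD n 0)

-- ===== PORT B =====
-- Source B's solve(i, j): top-down recursion with a memo dict (association list, read by first-match
-- lookup like a Python dict); returns the value together with the updated memo.
def solveB (a : List String) (b : List String) (values : List (String × Int))
    (fuel : Nat) (i j : Nat) (memo : List ((Nat × Nat) × Int)) : Int × List ((Nat × Nat) × Int) :=
  if i = 0 ∨ j = 0 then (0, memo)
  else
    match fuel with
    | 0 => (0, memo)  -- totality guard only: never reached when fuel ≥ i + j (callers pass fuel = i + j)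
    | fuel + 1 =>
      match memo.lookup (i, j) with
      | some r => (r, memo)
      | none =>
        let res :=
          if a.getD (i - 1) "" = b.getD (j - 1) "" then
            let d := solveB a b values fuel (i - 1) (j - 1) memo
            let u := solveB a b values fuel (i - 1) j d.2
            let l := solveB a b values fuel i (j - 1) u.2
            (max ((values.lookup (a.getD (i - 1) "")).getD 0 + d.1) (max u.1 l.1), l.2)
          else
            let u := solveB a b values fuel (i - 1) j memo
            let l := solveB a b values fuel i (j - 1) u.2
            (max u.1 l.1, l.2)
        (res.1, ((i, j), res.1) :: res.2)

def hvlcs_alt (a : List String) (b : List String) (values : List (String × Int)) : List (List Int) × Int :=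
  let m := a.length
  let n := b.length
  -- table = [[solve(i, j) for j in range(n + 1)] for i in range(m + 1)], threading the memo
  let st :=
    (List.range (m + 1)).foldl (fun (acc : List (List Int) × List ((Nat × Nat) × Int)) i =>
      let r :=
        (List.range (n + 1)).foldl (fun (racc : List Int × List ((Nat × Nat) × Int)) j =>
          let s := solveB a b values (i + j) i j racc.2
          (racc.1 ++ [s.1], s.2)) ([], acc.2)
      (acc.1 ++ [r.1], r.2)) ([], [])
  (st.1, (st.1.getD m []).getD n 0)

-- ===== PRECONDITION & SPEC =====
-- Pre_ excludes exactly the inputs where A raises KeyError: some element common to a and b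
-- is not a key of values.
def Pre_hvlcs (a : List String) (b : List String) (values : List (String × Int)) : Prop :=
  ∀ x ∈ a, x ∈ b → (values.lookup x).isSome = true
instance (a : List String) (b : List String) (values : List (String × Int)) : Decidable (Pre_hvlcs a b values) := by unfold Pre_hvlcs; infer_instance

def pvWitness_hvlcs : List String × List String × (List (String × Int)) :=
  (["x", "y"], ["y", "x"], [("x", 2), ("y", 3)])

def Spec_hvlcs (a : List String) (b : List String) (values : List (String × Int)) (out : List (List Int) × Int) : Prop := out = hvlcs_alt a b values
instance (a : List String) (b : List String) (values : List (String × Int)) (out : List (List Int) × Int) : Decidable (Spec_hvlcs a b values out) := by unfold Spec_hvlcs; infer_instance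

-- ===== CLAIM (what is proved, stated in full; the proofs are below) =====
def Claim_equal_hvlcs : Prop := ∀ (a : List String) (b : List String) (values : List (String × Int)), Dom_hvlcs a b values → Pre_hvlcs a b values → Spec_hvlcs a b values (hvlcs a b values)

-- ===== LEMMAS AND PROOFS =====

-- the mathematical DP recurrence both programs compute, cell by cell
def specT (a : List String) (b : List String) (values : List (String × Int)) (i j : Nat) : Int :=
  if i = 0 ∨ j = 0 then 0
  else if a.getD (i - 1) "" = b.getD (j - 1) "" then
    max ((values.lookup (a.getD (i - 1) "")).getD 0 + specT a b values (i - 1) (j - 1))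
      (max (specT a b values (i - 1) j) (specT a b values i (j - 1)))
  else max (specT a b values (i - 1) j) (specT a b values i (j - 1))
  termination_by i + j
  decreasing_by all_goals omega

-- a memo is OK when every stored value is the corresponding specT cell
def MemoOK (a : List String) (b : List String) (values : List (String × Int))
    (memo : List ((Nat × Nat) × Int)) : Prop :=
  ∀ p r, memo.lookup p = some r → r = specT a b values p.1 p.2

lemma specT_zero (a b : List String) (values : List (String × Int)) (i j : Nat)
    (h : i = 0 ∨ j = 0) : specT a b values i j = 0 := by
  rw [specT]; simp [h]


lemma MemoOK_cons (a b : List String) (values : List (String × Int))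
    (k : Nat × Nat) (v : Int) (rest : List ((Nat × Nat) × Int))
    (hv : v = specT a b values k.1 k.2) (hrest : MemoOK a b values rest) :
    MemoOK a b values ((k, v) :: rest) := by
  intro p r hlook
  simp only [List.lookup] at hlook
  by_cases hp : p = k
  · subst hp
    simp only [beq_self_eq_true] at hlook
    simp only [Option.some.injEq] at hlook
    rw [← hlook]
    exact hv
  · rw [beq_eq_false_iff_ne.mpr hp] at hlook
    exact hrest p r hlook

lemma solveB_spec (a b : List String) (values : List (String × Int)) :
    ∀ (fuel i j : Nat) (memo : List ((Nat × Nat) × Int)), i + j ≤ fuel → MemoOK a b values memo →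
      (solveB a b values fuel i j memo).1 = specT a b values i j ∧
      MemoOK a b values (solveB a b values fuel i j memo).2 := by
  intro fuel
  induction fuel with
  | zero =>
    intro i j memo hle hok
    have h0 : i = 0 ∨ j = 0 := by omega
    rw [solveB]
    simp only [h0, if_pos]
    exact ⟨(specT_zero a b values i j h0).symm, hok⟩
  | succ n ih =>
    intro i j memo hle hok
    by_cases h0 : i = 0 ∨ j = 0
    · rw [solveB]
      simp only [h0, if_true]
      exact ⟨(specT_zero a b values i j h0).symm, hok⟩
    · rw [solveB]
      simp only [h0, if_false]
      cases hm : memo.lookup (i, j) with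
      | some r =>
        exact ⟨hok (i, j) r hm, hok⟩
      | none =>
        have h1 : (i - 1) + (j - 1) ≤ n := by omega
        have h2 : (i - 1) + j ≤ n := by omega
        have h3 : i + (j - 1) ≤ n := by omega
        by_cases heq : a.getD (i - 1) "" = b.getD (j - 1) ""
        · rw [if_pos heq]
          obtain ⟨hd1, hd2⟩ := ih (i - 1) (j - 1) memo h1 hok
          obtain ⟨hu1, hu2⟩ := ih (i - 1) j _ h2 hd2
          obtain ⟨hl1, hl2⟩ := ih i (j - 1) _ h3 hu2
          have hval :
              max ((values.lookup (a.getD (i - 1) "")).getD 0 +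
                  (solveB a b values n (i - 1) (j - 1) memo).1)
                (max (solveB a b values n (i - 1) j (solveB a b values n (i - 1) (j - 1) memo).2).1
                  (solveB a b values n i (j - 1)
                    (solveB a b values n (i - 1) j (solveB a b values n (i - 1) (j - 1) memo).2).2).1)
              = specT a b values i j := by
            rw [hd1, hu1, hl1]
            conv_rhs => rw [specT]
            rw [if_neg h0, if_pos heq]
          exact ⟨hval, MemoOK_cons a b values (i, j) _ _ hval hl2⟩
        · rw [if_neg heq]
          obtain ⟨hu1, hu2⟩ := ih (i - 1) j memo h2 hok
          obtain ⟨hl1, hl2⟩ := ih i (j - 1) _ h3 hu2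
          have hval :
              max (solveB a b values n (i - 1) j memo).1
                (solveB a b values n i (j - 1) (solveB a b values n (i - 1) j memo).2).1
              = specT a b values i j := by
            rw [hu1, hl1]
            conv_rhs => rw [specT]
            rw [if_neg h0, if_neg heq]
          exact ⟨hval, MemoOK_cons a b values (i, j) _ _ hval hl2⟩

-- B's inner comprehension: querying solve for each j appends the specT cells
lemma inner_fold_spec (a b : List String) (values : List (String × Int)) (i : Nat) :
    ∀ (js : List Nat) (acc : List Int) (memo : List ((Nat × Nat) × Int)), MemoOK a b values memo →
      (js.foldl (fun (racc : List Int × List ((Nat × Nat) × Int)) j =>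
          let s := solveB a b values (i + j) i j racc.2
          (racc.1 ++ [s.1], s.2)) (acc, memo)).1
        = acc ++ js.map (specT a b values i) ∧
      MemoOK a b values
        (js.foldl (fun (racc : List Int × List ((Nat × Nat) × Int)) j =>
          let s := solveB a b values (i + j) i j racc.2
          (racc.1 ++ [s.1], s.2)) (acc, memo)).2 := by
  intro js
  induction js with
  | nil =>
    intro acc memo hok
    exact ⟨by simp, hok⟩
  | cons j js ihj =>
    intro acc memo hok
    obtain ⟨hs1, hs2⟩ := solveB_spec a b values (i + j) i j memo (le_refl _) hok
    obtain ⟨ih1, ih2⟩ := ihj (acc ++ [(solveB a b values (i + j) i j memo).1]) (solveB a b values (i + j) i j memo).2 hs2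
    refine ⟨ih1.trans ?_, ih2⟩
    rw [hs1]
    simp

-- B's outer comprehension appends the specT rows
lemma outer_fold_spec (a b : List String) (values : List (String × Int)) (n : Nat) :
    ∀ (is : List Nat) (acc : List (List Int)) (memo : List ((Nat × Nat) × Int)), MemoOK a b values memo →
      (is.foldl (fun (acc : List (List Int) × List ((Nat × Nat) × Int)) i =>
          let r :=
            (List.range (n + 1)).foldl (fun (racc : List Int × List ((Nat × Nat) × Int)) j =>
              let s := solveB a b values (i + j) i j racc.2
              (racc.1 ++ [s.1], s.2)) ([], acc.2)
          (acc.1 ++ [r.1], r.2)) (acc, memo)).1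
        = acc ++ is.map (fun i => (List.range (n + 1)).map (specT a b values i)) := by
  intro is
  induction is with
  | nil => intro acc memo _; simp
  | cons i is ihi =>
    intro acc memo hok
    obtain ⟨hr1, hr2⟩ := inner_fold_spec a b values i (List.range (n + 1)) [] memo hok
    have hrec := ihi (acc ++ [((List.range (n + 1)).foldl (fun (racc : List Int × List ((Nat × Nat) × Int)) j =>
        let s := solveB a b values (i + j) i j racc.2
        (racc.1 ++ [s.1], s.2)) ([], memo)).1])
      ((List.range (n + 1)).foldl (fun (racc : List Int × List ((Nat × Nat) × Int)) j =>
        let s := solveB a b values (i + j) i j racc.2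
        (racc.1 ++ [s.1], s.2)) ([], memo)).2 hr2
    refine hrec.trans ?_
    rw [hr1]
    simp

-- ===== A-side machinery (unchanged proof that A equals its row-by-row characterisation) =====

-- proof-side description of A's fill: row i+1 built left-to-right from row i
def hvlcsAltRow (values : List (String × Int)) (x : String) :
    List (String × Int × Int) → Int → List Int
  | [], _ => []
  | (y, d, up) :: rest, left =>
    let c : Int :=
      if x = y then max ((values.lookup x).getD 0 + d) (max up left)
      else max up left
    c :: hvlcsAltRow values x rest c

def rowFn (values : List (String × Int)) (b : List String) (p : List Int) (x : String) : List Int :=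
  0 :: hvlcsAltRow values x (b.zip (p.zip p.tail)) 0

def newRows (values : List (String × Int)) (b : List String) : List String → List Int → List (List Int)
  | [], _ => []
  | x :: xs, p => rowFn values b p x :: newRows values b xs (rowFn values b p x)

-- the Nat-level cell update of A's inner loop (i, j ≥ 1)
def cellA (values : List (String × Int)) (a b : List String) (t : List (List Int)) (i j : Nat) : List (List Int) :=
  let ai := a.getD (i - 1) ""
  let bj := b.getD (j - 1) ""
  let c : Int :=
    if ai = bj then
      max ((values.lookup ai).getD 0 + ((t.getD (i - 1) []).getD (j - 1) 0))
        (max ((t.getD (i - 1) []).getD j 0) ((t.getD i []).getD (j - 1) 0))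
    else
      max ((t.getD (i - 1) []).getD j 0) ((t.getD i []).getD (j - 1) 0)
  t.set i ((t.getD i []).set j c)

lemma pyRange_one_natCast (s k : Nat) :
    PySem.List.pyRange (s : Int) ((s : Int) + (k : Int)) 1
      = (List.range' s k).map (fun j : Nat => (j : Int)) := by
  induction k generalizing s with
  | zero => simp [PySem.List.pyRange_one_eq_nil, List.range']
  | succ k ih =>
    rw [PySem.List.pyRange_one_cons (by omega)]
    have h2 : (s : Int) + ((k + 1 : Nat) : Int) = ((s + 1 : Nat) : Int) + (k : Nat) := by
      push_cast; ring
    have h1 : (s : Int) + 1 = ((s + 1 : Nat) : Int) := by push_cast; ring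
    rw [h2, h1, ih]
    simp [List.range']

lemma pyRange_one_succ_natCast (k : Nat) :
    PySem.List.pyRange 1 ((k : Int) + 1) 1 = (List.range' 1 k).map (fun j : Nat => (j : Int)) := by
  have := pyRange_one_natCast 1 k
  have h : ((1 : Nat) : Int) + (k : Int) = (k : Int) + 1 := by ring
  rw [h] at this
  simpa using this

lemma set_getD_self (t : List (List Int)) (i : Nat) : t.set i (t.getD i []) = t := by
  induction t generalizing i with
  | nil => simp
  | cons h tl ih =>
    cases i with
    | zero => simp
    | succ n =>
      simp only [List.getD_cons_succ, List.set_cons_succ, ih]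

lemma set_append_len {α : Type} (l₁ l₂ : List α) (n : Nat) (x : α) :
    (l₁ ++ l₂).set (l₁.length + n) x = l₁ ++ l₂.set n x := by
  induction l₁ with
  | nil => simp
  | cons h tl ih => simp [Nat.succ_add, ih]

lemma getD_last {α : Type} (d : α) (l : List α) (k : Nat) (h : l.length = k + 1) :
    l.getD k d = (l.getLast?).getD d := by
  rw [List.getD_eq_getElem?_getD, List.getLast?_eq_getElem?, h]
  simp

lemma altRow_length (values : List (String × Int)) (x : String)
    (l : List (String × Int × Int)) (left : Int) :
    (hvlcsAltRow values x l left).length = l.length := by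
  induction l generalizing left with
  | nil => simp [hvlcsAltRow]
  | cons h tl ih =>
    obtain ⟨y, d, up⟩ := h
    simp [hvlcsAltRow, ih]

lemma rowFn_length (values : List (String × Int)) (b : List String) (p : List Int) (x : String)
    (hp : p.length = b.length + 1) :
    (rowFn values b p x).length = b.length + 1 := by
  simp [rowFn, altRow_length, hp]

-- inner-loop invariant: filling cells j0+1 … n of row i0+1 produces the rowFn suffix
lemma inner_inv (values : List (String × Int)) (a b : List String) (x : String) (i0 : Nat)
    (hx : a.getD i0 "" = x) (p : List Int) (hplen : p.length = b.length + 1) :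
    ∀ (cnt j0 : Nat) (t : List (List Int)) (pre : List Int) (left : Int),
    j0 + cnt = b.length →
    t.getD i0 [] = p →
    t.getD (i0 + 1) [] = pre ++ List.replicate cnt 0 →
    pre.length = j0 + 1 →
    (pre.getLast?).getD 0 = left →
    (List.range' (j0 + 1) cnt).foldl (fun t j => cellA values a b t (i0 + 1) j) t
      = t.set (i0 + 1)
          (pre ++ hvlcsAltRow values x ((b.drop j0).zip ((p.drop j0).zip (p.drop (j0 + 1)))) left) := by
  intro cnt
  induction cnt with
  | zero =>
    intro j0 t pre left hj hpi hz hlen hlast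
    have hb : b.drop j0 = [] := List.drop_eq_nil_of_le (by omega)
    have hz' : t.getD (i0 + 1) [] = pre := by simpa using hz
    simp only [List.range', List.foldl_nil, hb, List.zip_nil_left, hvlcsAltRow, List.append_nil]
    rw [← hz', set_getD_self]
  | succ cnt ih =>
    intro j0 t pre left hj hpi hz hlen hlast
    have hj0b : j0 < b.length := by omega
    have hj0p : j0 + 1 < p.length := by omega
    have hj0p' : j0 < p.length := by omega
    have htlen : i0 + 1 < t.length := by
      by_contra hcon
      have : t.getD (i0 + 1) [] = [] := List.getD_eq_default _ _ (by omega)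
      rw [this] at hz
      have : pre.length + cnt = 0 := by
        have := congrArg List.length hz
        simpa using this.symm
      omega
    have hrange : List.range' (j0 + 1) (cnt + 1) = (j0 + 1) :: List.range' (j0 + 2) cnt := by
      simp [List.range']
    rw [hrange, List.foldl_cons]
    have hleft' : (pre ++ List.replicate (cnt + 1) (0:Int)).getD j0 0 = left := by
      rw [List.getD_eq_getElem?_getD, List.getElem?_append_left (by omega),
        ← List.getD_eq_getElem?_getD, getD_last 0 pre j0 hlen, hlast]
    set c : Int :=
      if x = b.getD j0 "" then
        max ((values.lookup x).getD 0 + p.getD j0 0) (max (p.getD (j0 + 1) 0) left)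
      else max (p.getD (j0 + 1) 0) left with hc
    have hcell : cellA values a b t (i0 + 1) (j0 + 1)
        = t.set (i0 + 1) (pre ++ c :: List.replicate cnt 0) := by
      simp only [cellA, Nat.add_sub_cancel, hpi, hz, hx, hleft']
      rw [← hc]
      congr 1
      rw [List.replicate_succ, show j0 + 1 = pre.length + 0 by omega, set_append_len]
      simp
    rw [hcell]
    have hset_pi : (t.set (i0 + 1) (pre ++ c :: List.replicate cnt 0)).getD i0 [] = p := by
      rw [List.getD_eq_getElem?_getD, List.getElem?_set_ne (by omega), ← List.getD_eq_getElem?_getD, hpi]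
    have hset_z : (t.set (i0 + 1) (pre ++ c :: List.replicate cnt 0)).getD (i0 + 1) []
        = (pre ++ [c]) ++ List.replicate cnt 0 := by
      rw [List.getD_eq_getElem?_getD, List.getElem?_set_self (by omega)]
      simp
    have := ih (j0 + 1) (t.set (i0 + 1) (pre ++ c :: List.replicate cnt 0)) (pre ++ [c]) c
      (by omega) hset_pi hset_z (by simp [hlen]) (by simp)
    rw [this, List.set_set]
    congr 1
    rw [List.drop_eq_getElem_cons hj0b, List.drop_eq_getElem_cons hj0p',
      List.drop_eq_getElem_cons hj0p]
    simp only [List.zip_cons_cons, hvlcsAltRow]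
    have hb : b[j0] = b.getD j0 "" := by
      rw [List.getD_eq_getElem?_getD, List.getElem?_eq_getElem hj0b]
      rfl
    have hp1 : p[j0] = p.getD j0 0 := by
      rw [List.getD_eq_getElem?_getD, List.getElem?_eq_getElem hj0p']
      rfl
    have hp2 : p[j0 + 1] = p.getD (j0 + 1) 0 := by
      rw [List.getD_eq_getElem?_getD, List.getElem?_eq_getElem hj0p]
      rfl
    rw [hb, hp1, hp2, ← hc]
    simp [List.append_assoc]

-- the full inner loop fills row i0+1 with the rowFn row
lemma inner_row (values : List (String × Int)) (a b : List String) (x : String) (i0 : Nat)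
    (hx : a.getD i0 "" = x) (t : List (List Int)) (p : List Int)
    (hpi : t.getD i0 [] = p) (hplen : p.length = b.length + 1)
    (hz : t.getD (i0 + 1) [] = List.replicate (b.length + 1) 0) :
    (List.range' 1 b.length).foldl (fun t j => cellA values a b t (i0 + 1) j) t
      = t.set (i0 + 1) (rowFn values b p x) := by
  have := inner_inv values a b x i0 hx p hplen b.length 0 t [0] 0
    (by omega) hpi (by simpa [List.replicate_succ] using hz) (by simp) (by simp)
  simpa [rowFn, List.drop_one] using this

-- outer-loop invariant
lemma outer_inv (values : List (String × Int)) (a b : List String) :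
    ∀ (xs : List String) (s : Nat) (done : List (List Int)) (p : List Int),
    a.drop s = xs →
    done.length = s + 1 →
    (done.getLast?).getD [] = p →
    p.length = b.length + 1 →
    (List.range' (s + 1) xs.length).foldl
        (fun t i => (List.range' 1 b.length).foldl (fun t j => cellA values a b t i j) t)
        (done ++ List.replicate xs.length (List.replicate (b.length + 1) 0))
      = done ++ newRows values b xs p := by
  intro xs
  induction xs with
  | nil => intro s done p _ _ _ _; simp [newRows]
  | cons x xs ih =>
    intro s done p hdrop hdlen hdlast hplen
    have hrange : List.range' (s + 1) (xs.length + 1) = (s + 1) :: List.range' (s + 2) xs.length := by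
      simp [List.range']
    have hsa : s < a.length := by
      have := congrArg List.length hdrop
      simp at this
      omega
    have hx : a.getD s "" = x := by
      have : a[s] = x := by
        have h2 := List.drop_eq_getElem_cons hsa
        rw [hdrop] at h2
        exact (List.cons.injEq _ _ _ _ ▸ h2).1.symm
      rw [List.getD_eq_getElem?_getD, List.getElem?_eq_getElem hsa, this]
      rfl
    have hpi : (done ++ List.replicate (xs.length + 1) (List.replicate (b.length + 1) (0:Int))).getD s [] = p := by
      rw [List.getD_eq_getElem?_getD, List.getElem?_append_left (by omega), ← List.getD_eq_getElem?_getD]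
      rw [getD_last [] done s hdlen, hdlast]
    have hzi : (done ++ List.replicate (xs.length + 1) (List.replicate (b.length + 1) (0:Int))).getD (s + 1) []
        = List.replicate (b.length + 1) 0 := by
      rw [List.getD_eq_getElem?_getD, ← hdlen, List.getElem?_append_right (by omega)]
      simp [hdlen]
    simp only [List.length_cons, hrange, List.foldl_cons]
    rw [inner_row values a b x s hx _ p hpi hplen hzi]
    have hsetstep : (done ++ List.replicate (xs.length + 1) (List.replicate (b.length + 1) (0:Int))).set (s + 1) (rowFn values b p x)
        = (done ++ [rowFn values b p x]) ++ List.replicate xs.length (List.replicate (b.length + 1) 0) := by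
      have := set_append_len done (List.replicate (xs.length + 1) (List.replicate (b.length + 1) (0:Int))) 0 (rowFn values b p x)
      rw [hdlen] at this
      simp only [Nat.add_zero] at this
      rw [this, List.replicate_succ, List.set_cons_zero, List.append_assoc, List.singleton_append]
    rw [hsetstep]
    have hdrop' : a.drop (s + 1) = xs := by
      rw [← List.tail_drop, hdrop]
      rfl
    have := ih (s + 1) (done ++ [rowFn values b p x]) (rowFn values b p x)
      hdrop' (by simp [hdlen]) (by simp) (rowFn_length values b p x hplen)
    rw [this]
    simp [newRows, List.append_assoc]

-- A's port, restated as the Nat-level fold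
lemma hvlcs_eq_natFold (a b : List String) (values : List (String × Int)) :
    hvlcs a b values =
      (let table := (List.range' 1 a.length).foldl
          (fun t i => (List.range' 1 b.length).foldl (fun t j => cellA values a b t i j) t)
          (List.replicate (a.length + 1) (List.replicate (b.length + 1) (0 : Int)))
       (table, (table.getD a.length []).getD b.length 0)) := by
  simp only [hvlcs, cellA, pyRange_one_succ_natCast, List.foldl_map, Int.toNat_natCast,
    List.map_const', List.length_range]

-- ===== bridging A's rows to specT =====

lemma altRow_spec (a b : List String) (values : List (String × Int)) (s : Nat) :
    ∀ (cnt j0 : Nat), j0 + cnt = b.length →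
      hvlcsAltRow values (a.getD s "")
          ((b.drop j0).zip
            (((List.range' j0 (cnt + 1)).map (specT a b values s)).zip
              ((List.range' (j0 + 1) cnt).map (specT a b values s))))
          (specT a b values (s + 1) j0)
        = (List.range' (j0 + 1) cnt).map (specT a b values (s + 1)) := by
  intro cnt
  induction cnt with
  | zero => intro j0 _; simp [hvlcsAltRow]
  | succ cnt ih =>
    intro j0 hj
    have hj0b : j0 < b.length := by omega
    have hb : b.drop j0 = b[j0] :: b.drop (j0 + 1) := List.drop_eq_getElem_cons hj0b
    have hr1 : List.range' j0 (cnt + 2) = j0 :: (j0 + 1) :: List.range' (j0 + 2) cnt := by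
      simp [List.range']
    have hr2 : List.range' (j0 + 1) (cnt + 1) = (j0 + 1) :: List.range' (j0 + 2) cnt := by
      simp [List.range']
    rw [hb, hr1, hr2]
    simp only [List.map_cons, List.zip_cons_cons, hvlcsAltRow]
    have hbj : b[j0] = b.getD j0 "" := by
      rw [List.getD_eq_getElem?_getD, List.getElem?_eq_getElem hj0b]
      rfl
    have hcell :
        (if a.getD s "" = b[j0] then
          max ((values.lookup (a.getD s "")).getD 0 + specT a b values s j0)
            (max (specT a b values s (j0 + 1)) (specT a b values (s + 1) j0))
        else max (specT a b values s (j0 + 1)) (specT a b values (s + 1) j0))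
        = specT a b values (s + 1) (j0 + 1) := by
      conv_rhs => rw [specT]
      have hne : ¬(s + 1 = 0 ∨ j0 + 1 = 0) := by omega
      rw [if_neg hne]
      simp only [Nat.add_sub_cancel, hbj]
    rw [hcell]
    have := ih (j0 + 1) (by omega)
    rw [hr2] at this
    simp only [List.map_cons] at this ⊢
    rw [this]

lemma rowFn_spec (a b : List String) (values : List (String × Int)) (s : Nat) (x : String)
    (hx : a.getD s "" = x) :
    rowFn values b ((List.range' 0 (b.length + 1)).map (specT a b values s)) x
      = (List.range' 0 (b.length + 1)).map (specT a b values (s + 1)) := by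
  have hr : List.range' 0 (b.length + 1) = 0 :: List.range' 1 b.length := by
    simp [List.range']
  have h0l : specT a b values (s + 1) 0 = 0 := specT_zero a b values (s + 1) 0 (Or.inr rfl)
  have halt := altRow_spec a b values s b.length 0 (by omega)
  simp only [List.drop_zero, Nat.zero_add] at halt
  rw [h0l] at halt
  have htail : (List.map (specT a b values s) (List.range' 0 (b.length + 1))).tail
      = List.map (specT a b values s) (List.range' 1 b.length) := by
    rw [hr]; simp
  rw [← hx, rowFn, htail, halt, hr]
  simp [h0l]

lemma newRows_spec (a b : List String) (values : List (String × Int)) :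
    ∀ (xs : List String) (s : Nat), a.drop s = xs →
      newRows values b xs ((List.range' 0 (b.length + 1)).map (specT a b values s))
        = (List.range' (s + 1) xs.length).map
            (fun i => (List.range' 0 (b.length + 1)).map (specT a b values i)) := by
  intro xs
  induction xs with
  | nil => intro s _; simp [newRows]
  | cons x xs ih =>
    intro s hdrop
    have hsa : s < a.length := by
      have := congrArg List.length hdrop
      simp at this
      omega
    have hx : a.getD s "" = x := by
      have : a[s] = x := by
        have h2 := List.drop_eq_getElem_cons hsa
        rw [hdrop] at h2
        exact (List.cons.injEq _ _ _ _ ▸ h2).1.symm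
      rw [List.getD_eq_getElem?_getD, List.getElem?_eq_getElem hsa, this]
      rfl
    have hdrop' : a.drop (s + 1) = xs := by
      rw [← List.tail_drop, hdrop]
      rfl
    have hrow := rowFn_spec a b values s x hx
    have hr : List.range' (s + 1) (xs.length + 1) = (s + 1) :: List.range' (s + 2) xs.length := by
      simp [List.range']
    simp only [newRows, List.length_cons, hr, List.map_cons, hrow]
    rw [ih (s + 1) hdrop']

lemma zero_row_spec (a b : List String) (values : List (String × Int)) (k : Nat) :
    (List.range' 0 k).map (specT a b values 0) = List.replicate k 0 := by
  have h : ∀ j ∈ List.range' 0 k, specT a b values 0 j = 0 :=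
    fun j _ => specT_zero a b values 0 j (Or.inl rfl)
  rw [List.map_congr_left h]
  simp [List.map_const']

-- both ports equal the specT table
theorem hvlcs_eq_alt (a b : List String) (values : List (String × Int)) :
    hvlcs a b values = hvlcs_alt a b values := by
  set m := a.length with hm
  set n := b.length with hn
  set tbl : List (List Int) :=
    (List.range' 0 (m + 1)).map (fun i => (List.range' 0 (n + 1)).map (specT a b values i))
    with htbl
  -- A's side
  have hzr : List.replicate (m + 1) (List.replicate (n + 1) (0:Int))
      = [List.replicate (n + 1) 0] ++ List.replicate m (List.replicate (n + 1) 0) := by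
    simp [List.replicate_succ]
  have houter := outer_inv values a b a 0 [List.replicate (n + 1) 0]
    (List.replicate (n + 1) 0) (by simp) (by simp) (by simp) (by simp [hn])
  have hA : hvlcs a b values = (tbl, (tbl.getD m []).getD n 0) := by
    rw [hvlcs_eq_natFold]
    simp only [← hm, ← hn, hzr]
    rw [houter]
    have hnr : newRows values b a (List.replicate (n + 1) 0)
        = (List.range' 1 a.length).map
            (fun i => (List.range' 0 (n + 1)).map (specT a b values i)) := by
      rw [← zero_row_spec a b values (n + 1)]
      have := newRows_spec a b values a 0 (by simp)
      simpa using this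
    have hsplit : tbl = [List.replicate (n + 1) 0]
        ++ (List.range' 1 a.length).map
            (fun i => (List.range' 0 (n + 1)).map (specT a b values i)) := by
      rw [htbl]
      have : List.range' 0 (m + 1) = 0 :: List.range' 1 m := by simp [List.range']
      rw [this]
      simp [zero_row_spec, hm]
    rw [hnr, ← hsplit]
  -- B's side
  have hB : hvlcs_alt a b values = (tbl, (tbl.getD m []).getD n 0) := by
    have hok : MemoOK a b values [] := by intro p r h; simp at h
    have hfold := outer_fold_spec a b values n (List.range (m + 1)) [] [] hok
    simp only [List.nil_append] at hfold
    simp only [hvlcs_alt, ← hm, ← hn]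
    rw [hfold]
    rw [htbl]
    simp [List.range_eq_range']
  rw [hA, hB]

-- ===== VERDICT (by name: the statement is the Claim_ definition above) =====
theorem hvlcs_spec : Claim_equal_hvlcs := by
  intro a b values _ _
  show _ = _
  exact hvlcs_eq_alt a b values
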